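-- pv_equiv track=rewrite | github.com/grasshopperTrainer/coding_practice | baekjoon/accepted/17825 주사위 윷놀이.py | solution
-- ===== SOURCE A (Python) =====
-- GRAPHS = [[0, 2, 4, 6, 8, 10, 12, 14, 16, 18, 20, 22, 24, 26, 28, 30, 32, 34, 36, 38, 40, 0],
--           [10, 13, 16, 19],
--           [20, 22, 24],
--           [30, 28, 27, 26],
--           [25, 30, 35]]
--
-- def is_finished(pos, graph):
--     return graph == 0 and 21 <= pos
--
-- def is_occupied(horses, pos, graph):
--     if is_finished(pos, graph):
--         return False
--     if (pos, graph) in horses: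
--         return True
--
-- def normalize_pos(pos, graph_idx):
--     if graph_idx == 0:
--         if pos in (5, 10, 15):
--             new_horse = 0, {5: 1, 10: 2, 15: 3}[pos]
--         elif 21 <= pos:
--             new_horse = 21, 0
--         else:
--             new_horse = pos, 0
--     elif graph_idx in (1, 2, 3):
--         if pos < len(GRAPHS[graph_idx]):
--             new_horse = pos, graph_idx
--         else:
--             pos -= len(GRAPHS[graph_idx])
--             new_horse = normalize_pos(pos, 4)
--     else:  # graph_idx == 4
--         if pos < len(GRAPHS[4]):
--             new_horse = pos, 4
--         else:
--             pos = 20 + pos - len(GRAPHS[4])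
--             new_horse = normalize_pos(pos, 0)
--     return new_horse
--
-- def solution(values):
--     dp = {}
--
--     def search(horses, values, dice, score):
--         normalized = [dice]
--         for a, b in sorted(horses):
--             normalized.append(a)
--             normalized.append(b)
--         normalized = tuple(normalized)
--         if normalized in dp:
--             return dp[normalized] + score
--
--         if dice == len(values):
--             return score
--
--         best_score = score
--         dice_val = values[dice]
--         for i, (pos, graph_idx) in enumerate(horses):
--             # horse is already at finished
--             if is_finished(pos, graph_idx):
--                 continue
--             # next pos
--             new_pos = normalize_pos(pos + dice_val, graph_idx)
--             if not is_occupied(horses, *new_pos):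
--                 point = GRAPHS[new_pos[1]][new_pos[0]]
--                 horses[i] = new_pos
--                 best_score = max(best_score, search(horses, values, dice + 1, score + point))
--                 horses[i] = pos, graph_idx
--
--         dp[normalized] = best_score - score
--         return best_score
--
--     horses = [(0, 0), (0, 0), (0, 0), (0, 0)]
--     return search(horses, values, 0, 0)
-- ===== SOURCE B (Python) =====
-- GRAPHS = [[0, 2, 4, 6, 8, 10, 12, 14, 16, 18, 20, 22, 24, 26, 28, 30, 32, 34, 36, 38, 40, 0],
--           [10, 13, 16, 19],
--           [20, 22, 24],
--           [30, 28, 27, 26],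
--           [25, 30, 35]]
--
-- # Flat board: node id = 5*pos + graph_idx.  FINISH is cell 21 of the main track.
-- FINISH = 5 * 21
--
--
-- def _build_board():
--     succ = {}
--     score = {}
--     # main track (graph 0): 0..21, absorbing at the finish cell
--     for p in range(22):
--         score[5 * p] = GRAPHS[0][p]
--         succ[5 * p] = 5 * min(p + 1, 21)
--     # shortcut arms (graphs 1..3) feed into the diagonal (graph 4)
--     for g in (1, 2, 3):
--         arm = GRAPHS[g]
--         for p in range(len(arm)):
--             score[5 * p + g] = arm[p]
--             succ[5 * p + g] = 5 * (p + 1) + g if p + 1 < len(arm) else 4  # -> (0, 4)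
--     # diagonal (graph 4) exits onto main-track cell 20
--     for p in range(3):
--         score[5 * p + 4] = GRAPHS[4][p]
--         succ[5 * p + 4] = 5 * (p + 1) + 4 if p + 1 < 3 else 5 * 20
--     return succ, score
--
--
-- SUCC, SCORE = _build_board()
-- # landing exactly on a blue cell of the main track enters the matching arm
-- SHORTCUT = {5 * 5: 1, 5 * 10: 2, 5 * 15: 3}
--
--
-- def _move(node, d):
--     for _ in range(min(d, 22)):  # every node reaches FINISH within 22 steps
--         node = SUCC[node]
--     return SHORTCUT.get(node, node)
--
--
-- def solution(values):
--     dp = {}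
--     n = len(values)
--
--     def search(nodes, dice, score):
--         key = (dice, *sorted(nodes))
--         if key in dp:
--             return dp[key] + score
--         if dice == n:
--             return score
--         d = values[dice]
--         best = score
--         for i, node in enumerate(nodes):
--             if node == FINISH:
--                 continue
--             dest = _move(node, d)
--             if dest != FINISH and dest in nodes:
--                 continue
--             nodes[i] = dest
--             best = max(best, search(nodes, dice + 1, score + SCORE[dest]))
--             nodes[i] = node
--         dp[key] = best - score
--         return best
--
--     return search([0, 0, 0, 0], 0, 0)
-- ===== Notes on version B (the rewrite author's own statement) =====
-- stated objective: alternative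
-- what changed: B replaces A's (pos, graph_index) multi-graph encoding with its recursive cross-graph normalize_pos by a flat board built once at startup: packed int node ids with precomputed successor and score tables, a bounded table-lookup walk plus a blue-cell shortcut map for each move, and int-tuple memo keys, keeping the memoized DFS over the four horses.
-- outside the precondition, e.g. on solution([-5]): A returns 34, B returns 0; on solution([3, -2]): A returns 46, B returns 6; on solution([-30]): A raises IndexError, B returns 0
import Mathlib
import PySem

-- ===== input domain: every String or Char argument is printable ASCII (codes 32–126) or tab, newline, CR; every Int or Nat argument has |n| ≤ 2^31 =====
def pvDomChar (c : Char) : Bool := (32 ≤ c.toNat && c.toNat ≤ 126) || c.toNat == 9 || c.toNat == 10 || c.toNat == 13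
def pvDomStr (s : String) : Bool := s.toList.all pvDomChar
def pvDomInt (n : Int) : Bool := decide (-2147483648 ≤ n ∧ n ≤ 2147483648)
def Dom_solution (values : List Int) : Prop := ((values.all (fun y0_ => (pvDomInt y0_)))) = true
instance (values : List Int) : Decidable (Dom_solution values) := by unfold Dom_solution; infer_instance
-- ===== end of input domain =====

-- B replaces the (pos, graph) multi-graph encoding and recursive normalization of A by a flat
-- board built once: packed int node ids with precomputed successor/score tables and a bounded
-- table-lookup walk per move (objective: alternative; equivalence is about the return value).

-- ===== PORT A =====
def GRAPHS : List (List Int) :=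
  [[0, 2, 4, 6, 8, 10, 12, 14, 16, 18, 20, 22, 24, 26, 28, 30, 32, 34, 36, 38, 40, 0],
   [10, 13, 16, 19],
   [20, 22, 24],
   [30, 28, 27, 26],
   [25, 30, 35]]

def is_finished (pos graph : Int) : Bool := graph == 0 && decide (21 ≤ pos)

def is_occupied (horses : List (Int × Int)) (pos graph : Int) : Bool :=
  if is_finished pos graph then false else decide ((pos, graph) ∈ horses)

-- Python's recursion has depth ≤ 3 (graphs 1-3 → 4 → 0); fuel 3 makes that structural.
def normalizeAux : Nat → Int → Int → Int × Int
  | 0, pos, graph_idx => (pos, graph_idx)  -- unreachable with fuel 3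
  | fuel + 1, pos, graph_idx =>
    if graph_idx = 0 then
      if pos = 5 ∨ pos = 10 ∨ pos = 15 then
        (0, PySem.Dict.getD (PySem.Dict.ofList [((5 : Int), (1 : Int)), (10, 2), (15, 3)]) pos 0)
      else if 21 ≤ pos then (21, 0)
      else (pos, 0)
    else if graph_idx = 1 ∨ graph_idx = 2 ∨ graph_idx = 3 then
      if pos < PySem.List.len ((PySem.List.pyGet? GRAPHS graph_idx).getD []) then (pos, graph_idx)
      else normalizeAux fuel (pos - PySem.List.len ((PySem.List.pyGet? GRAPHS graph_idx).getD [])) 4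
    else
      if pos < PySem.List.len ((PySem.List.pyGet? GRAPHS 4).getD []) then (pos, 4)
      else normalizeAux fuel (20 + pos - PySem.List.len ((PySem.List.pyGet? GRAPHS 4).getD [])) 0

def normalize_pos (pos graph_idx : Int) : Int × Int := normalizeAux 3 pos graph_idx

-- the memo key [dice, a1, b1, a2, b2, ...] built from the sorted horse list
def keyA (dice : Nat) (horses : List (Int × Int)) : List Int :=
  (PySem.List.sorted2 horses (fun h => h.1) (fun h => h.2)).foldl
    (fun acc h => acc ++ [h.1, h.2]) [(dice : Int)]

def searchA (values : List Int) :
    Nat → List (Int × Int) → Nat → Int → PySem.Dict (List Int) Int →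
    Int × PySem.Dict (List Int) Int
  | fuel, horses, dice, score, dp =>
    let normalized := keyA dice horses
    match PySem.Dict.get? dp normalized with
    | some v => (v + score, dp)
    | none =>
      if dice = values.length then (score, dp)
      else
        match fuel with
        | 0 => (score, dp)  -- unreachable: fuel = values.length - dice on every call
        | fuel' + 1 =>
          let dice_val := (PySem.List.pyGet? values (dice : Int)).getD 0
          let r := (PySem.List.enumerate horses).foldl
            (fun (acc : Int × PySem.Dict (List Int) Int) q =>
              if is_finished q.2.1 q.2.2 then acc
              else
                let np := normalize_pos (q.2.1 + dice_val) q.2.2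
                if is_occupied horses np.1 np.2 then acc
                else
                  let point := (PySem.List.pyGet? ((PySem.List.pyGet? GRAPHS np.2).getD []) np.1).getD 0
                  let s := searchA values fuel' (PySem.List.pySetD horses q.1 np) (dice + 1)
                             (score + point) acc.2
                  (max acc.1 s.1, s.2))
            (score, dp)
          (r.1, PySem.Dict.insert r.2 normalized (r.1 - score))

def solution (values : List Int) : Int :=
  (searchA values values.length [(0, 0), (0, 0), (0, 0), (0, 0)] 0 0 PySem.Dict.empty).1

-- ===== PORT B =====
-- flat board: node id = 5*pos + graph_idx; FINISH is main-track cell 21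
def FINISHB : Int := 5 * 21

def buildBoard : PySem.Dict Int Int × PySem.Dict Int Int :=
  let t0 : PySem.Dict Int Int × PySem.Dict Int Int := (PySem.Dict.empty, PySem.Dict.empty)
  -- main track
  let t1 := (PySem.List.pyRange 0 22 1).foldl
    (fun (t : PySem.Dict Int Int × PySem.Dict Int Int) p =>
      (t.1.insert (5 * p) (5 * min (p + 1) 21),
       t.2.insert (5 * p) ((PySem.List.pyGet? ((PySem.List.pyGet? GRAPHS 0).getD []) p).getD 0))) t0
  -- shortcut arms 1..3 feed the diagonal
  let t2 := [(1 : Int), 2, 3].foldl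
    (fun (t : PySem.Dict Int Int × PySem.Dict Int Int) g =>
      let arm := (PySem.List.pyGet? GRAPHS g).getD []
      (PySem.List.pyRange 0 (PySem.List.len arm) 1).foldl
        (fun (t : PySem.Dict Int Int × PySem.Dict Int Int) p =>
          (t.1.insert (5 * p + g) (if p + 1 < PySem.List.len arm then 5 * (p + 1) + g else 4),
           t.2.insert (5 * p + g) ((PySem.List.pyGet? arm p).getD 0))) t) t1
  -- diagonal exits onto main-track cell 20
  (PySem.List.pyRange 0 3 1).foldl
    (fun (t : PySem.Dict Int Int × PySem.Dict Int Int) p =>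
      (t.1.insert (5 * p + 4) (if p + 1 < 3 then 5 * (p + 1) + 4 else 5 * 20),
       t.2.insert (5 * p + 4) ((PySem.List.pyGet? ((PySem.List.pyGet? GRAPHS 4).getD []) p).getD 0))) t2

def SUCCd : PySem.Dict Int Int := buildBoard.1
def SCOREd : PySem.Dict Int Int := buildBoard.2
def SHORTCUT : PySem.Dict Int Int := PySem.Dict.ofList [((25 : Int), (1 : Int)), (50, 2), (75, 3)]

def moveB (node d : Int) : Int :=
  let n := (PySem.List.pyRange 0 (min d 22) 1).foldl (fun n _ => SUCCd.getD n 0) node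
  SHORTCUT.getD n n

def keyB (dice : Nat) (nodes : List Int) : List Int :=
  (dice : Int) :: PySem.List.sorted nodes (fun x => x)

def searchB (values : List Int) :
    Nat → List Int → Nat → Int → PySem.Dict (List Int) Int →
    Int × PySem.Dict (List Int) Int
  | fuel, nodes, dice, score, dp =>
    let key := keyB dice nodes
    match PySem.Dict.get? dp key with
    | some v => (v + score, dp)
    | none =>
      if dice = values.length then (score, dp)
      else
        match fuel with
        | 0 => (score, dp)  -- unreachable: fuel = values.length - dice on every call
        | fuel' + 1 =>
          let d := (PySem.List.pyGet? values (dice : Int)).getD 0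
          let r := (PySem.List.enumerate nodes).foldl
            (fun (acc : Int × PySem.Dict (List Int) Int) q =>
              if q.2 == FINISHB then acc
              else
                let dest := moveB q.2 d
                if dest != FINISHB && decide (dest ∈ nodes) then acc
                else
                  let s := searchB values fuel' (PySem.List.pySetD nodes q.1 dest) (dice + 1)
                             (score + PySem.Dict.getD SCOREd dest 0) acc.2
                  (max acc.1 s.1, s.2))
            (score, dp)
          (r.1, PySem.Dict.insert r.2 key (r.1 - score))

def solution_alt (values : List Int) : Int :=
  (searchB values values.length [0, 0, 0, 0] 0 0 PySem.Dict.empty).1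

-- ===== PRECONDITION & SPEC =====
-- Pre_ excludes lists containing a negative roll: the board has no backward moves, and on such
-- rolls A either raises IndexError or returns a value produced by Python's negative-index
-- wraparound into GRAPHS — accidental behaviour no caller would specify (B stays put there).
def Pre_solution (values : List Int) : Prop := ∀ v ∈ values, 0 ≤ v
instance (values : List Int) : Decidable (Pre_solution values) := by unfold Pre_solution; infer_instance

def pvWitness_solution : List Int := [5, 3, 2, 4, 1]

def Spec_solution (values : List Int) (out : Int) : Prop := out = solution_alt values
instance (values : List Int) (out : Int) : Decidable (Spec_solution values out) := by unfold Spec_solution; infer_instance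

-- ===== CLAIM (what is proved, stated in full; the proofs are below) =====
def Claim_equal_solution : Prop := ∀ (values : List Int), Dom_solution values → Pre_solution values → Spec_solution values (solution values)

-- ===== LEMMAS AND PROOFS =====

-- the 33 states a horse can occupy (the start plus every output of normalize_pos it can reach)
def VN : List (Int × Int) :=
  [(0,0),(1,0),(2,0),(3,0),(4,0),(6,0),(7,0),(8,0),(9,0),(11,0),(12,0),(13,0),(14,0),
   (16,0),(17,0),(18,0),(19,0),(20,0),(21,0),
   (0,1),(1,1),(2,1),(3,1),
   (0,2),(1,2),(2,2),
   (0,3),(1,3),(2,3),(3,3),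
   (0,4),(1,4),(2,4)]

def phi (h : Int × Int) : Int := 5 * h.1 + h.2

theorem phi_inj_VN : ∀ a ∈ VN, ∀ b ∈ VN, phi a = phi b → a = b := by decide

theorem vn_shape : ∀ h ∈ VN, 0 ≤ h.1 ∧ (h.2 = 0 ∨ h.2 = 1 ∨ h.2 = 2 ∨ h.2 = 3 ∨ h.2 = 4) := by
  decide

theorem fin_iff : ∀ h ∈ VN, is_finished h.1 h.2 = (phi h == FINISHB) := by decide

theorem score_eq : ∀ h ∈ VN,
    (PySem.List.pyGet? ((PySem.List.pyGet? GRAPHS h.2).getD []) h.1).getD 0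
      = PySem.Dict.getD SCOREd (phi h) 0 := by decide

set_option maxHeartbeats 8000000 in
set_option maxRecDepth 10000 in
theorem move_small : ∀ h ∈ VN, ∀ k : Nat, k < 22 →
    normalize_pos (h.1 + (k : Int)) h.2 ∈ VN ∧
    moveB (phi h) (k : Int) = phi (normalize_pos (h.1 + (k : Int)) h.2) := by decide

theorem nz0_big (f : Nat) (p : Int) (hp : 22 ≤ p) : normalizeAux (f + 1) p 0 = (21, 0) := by
  simp only [normalizeAux]
  split_ifs <;> first | rfl | omega

theorem nz4_big (f : Nat) (p : Int) (hp : 5 ≤ p) : normalizeAux (f + 2) p 4 = (21, 0) := by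
  have hl4 : PySem.List.len ((PySem.List.pyGet? GRAPHS 4).getD []) = 3 := by decide
  show normalizeAux (f + 1 + 1) p 4 = (21, 0)
  simp only [normalizeAux, hl4]
  split_ifs <;> first | rfl | omega

theorem unfold_g1 (p : Int) :
    normalizeAux 3 p 1 = if p < 4 then (p, 1) else normalizeAux 2 (p - 4) 4 := rfl
theorem unfold_g2 (p : Int) :
    normalizeAux 3 p 2 = if p < 3 then (p, 2) else normalizeAux 2 (p - 3) 4 := rfl
theorem unfold_g3 (p : Int) :
    normalizeAux 3 p 3 = if p < 4 then (p, 3) else normalizeAux 2 (p - 4) 4 := rfl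

theorem norm_big : ∀ h ∈ VN, ∀ d : Int, 22 ≤ d → normalize_pos (h.1 + d) h.2 = (21, 0) := by
  intro h hm d hd
  obtain ⟨hp, hg⟩ := vn_shape h hm
  show normalizeAux 3 (h.1 + d) h.2 = (21, 0)
  rcases hg with hg | hg | hg | hg | hg <;> rw [hg]
  · exact nz0_big 2 _ (by omega)
  · rw [unfold_g1, if_neg (by omega)]; exact nz4_big 0 _ (by omega)
  · rw [unfold_g2, if_neg (by omega)]; exact nz4_big 0 _ (by omega)
  · rw [unfold_g3, if_neg (by omega)]; exact nz4_big 0 _ (by omega)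
  · exact nz4_big 1 _ (by omega)

set_option maxRecDepth 4000 in
theorem walk22 : ∀ h ∈ VN,
    (PySem.List.pyRange 0 22 1).foldl (fun n _ => PySem.Dict.getD SUCCd n 0) (phi h) = 105 := by
  decide

theorem moveB_big : ∀ h ∈ VN, ∀ d : Int, 22 ≤ d → moveB (phi h) d = FINISHB := by
  intro h hm d hd
  have hmin : min d 22 = (22 : Int) := min_eq_right hd
  simp only [moveB, hmin]
  rw [walk22 h hm]
  decide

theorem move_corr : ∀ h ∈ VN, ∀ d : Int, 0 ≤ d →
    normalize_pos (h.1 + d) h.2 ∈ VN ∧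
    moveB (phi h) d = phi (normalize_pos (h.1 + d) h.2) := by
  intro h hm d hd
  by_cases hbig : 22 ≤ d
  · rw [norm_big h hm d hbig, moveB_big h hm d hbig]
    exact ⟨by decide, by decide⟩
  · obtain ⟨k, hk⟩ : ∃ k : Nat, d = (k : Int) := ⟨d.toNat, (Int.toNat_of_nonneg hd).symm⟩
    subst hk
    exact move_small h hm k (by omega)

-- ---- sorted-key correspondence ----
def cmpLex (a b : Int × Int) : Bool :=
  decide (a.1 < b.1) || (!decide (b.1 < a.1) && decide (a.2 < b.2))

theorem cmp_eq_phi : ∀ a ∈ VN, ∀ c ∈ VN, cmpLex a c = decide (phi a < phi c) := by decide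

theorem sorted2_eq_foldl (hs : List (Int × Int)) :
    PySem.List.sorted2 hs (fun h => h.1) (fun h => h.2)
      = hs.foldl (fun acc x => PySem.List.insertBy cmpLex x acc) [] := rfl

theorem insertBy_cons (b : (Int × Int) → (Int × Int) → Bool) (x y : Int × Int)
    (ys : List (Int × Int)) :
    PySem.List.insertBy b x (y :: ys)
      = if b x y then x :: y :: ys else y :: PySem.List.insertBy b x ys := rfl

theorem insertBy_congr (b b' : (Int × Int) → (Int × Int) → Bool) (x : Int × Int) :
    ∀ ys : List (Int × Int), (∀ y ∈ ys, b x y = b' x y) →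
      PySem.List.insertBy b x ys = PySem.List.insertBy b' x ys := by
  intro ys
  induction ys with
  | nil => intro _; rfl
  | cons y ys ih =>
    intro h
    rw [insertBy_cons, insertBy_cons, h y (by simp), ih (fun z hz => h z (by simp [hz]))]

theorem foldl_insertBy_congr (b b' : (Int × Int) → (Int × Int) → Bool)
    (hbb : ∀ a c : Int × Int, a ∈ VN → c ∈ VN → b a c = b' a c) :
    ∀ (xs acc : List (Int × Int)), (∀ a ∈ xs, a ∈ VN) → (∀ a ∈ acc, a ∈ VN) →
      xs.foldl (fun acc x => PySem.List.insertBy b x acc) acc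
        = xs.foldl (fun acc x => PySem.List.insertBy b' x acc) acc := by
  intro xs
  induction xs with
  | nil => intro acc _ _; rfl
  | cons x xs ih =>
    intro acc hx hacc
    simp only [List.foldl_cons]
    rw [insertBy_congr b b' x acc (fun y hy => hbb x y (hx x (by simp)) (hacc y hy))]
    exact ih _ (fun a ha => hx a (by simp [ha]))
      (fun a ha => by
        rcases (PySem.List.mem_insertBy _ _ _ _).mp ha with h | h
        · exact h ▸ hx x (by simp)
        · exact hacc a h)

theorem sorted2_eq_sorted_phi (hs : List (Int × Int)) (hsub : ∀ h ∈ hs, h ∈ VN) :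
    PySem.List.sorted2 hs (fun h => h.1) (fun h => h.2) = PySem.List.sorted hs phi := by
  rw [sorted2_eq_foldl, PySem.List.sorted_eq_foldl_insertBy]
  exact foldl_insertBy_congr cmpLex (fun a b => decide (phi a < phi b))
    (fun a c ha hc => cmp_eq_phi a ha c hc) hs [] hsub (by simp)

theorem map_sorted_phi (hs : List (Int × Int)) :
    (PySem.List.sorted hs phi).map phi = PySem.List.sorted (hs.map phi) (fun x => x) := by
  refine (PySem.List.sorted_id_eq_of_perm_of_pairwise _ _ ?_ ?_).symm
  · exact (PySem.List.sorted_perm hs phi false).map phi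
  · exact List.pairwise_map.mpr (PySem.List.sorted_pairwise hs phi)

theorem key_corr (hs : List (Int × Int)) (hsub : ∀ h ∈ hs, h ∈ VN) (dice : Nat) :
    keyB dice (hs.map phi) = (dice : Int) ::
      (PySem.List.sorted2 hs (fun h => h.1) (fun h => h.2)).map phi := by
  unfold keyB
  rw [← map_sorted_phi, ← sorted2_eq_sorted_phi hs hsub]

theorem keyA_flat (hs : List (Int × Int)) (dice : Nat) :
    keyA dice hs = (dice : Int) ::
      (PySem.List.sorted2 hs (fun h => h.1) (fun h => h.2)).flatMap (fun h => [h.1, h.2]) := by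
  unfold keyA
  rw [PySem.List.foldl_append_eq_flatMap]
  rfl

theorem flat_inj : ∀ l l' : List (Int × Int),
    l.flatMap (fun h => [h.1, h.2]) = l'.flatMap (fun h => [h.1, h.2]) → l = l' := by
  intro l
  induction l with
  | nil => intro l' h; cases l' with
    | nil => rfl
    | cons b u => simp at h
  | cons a t ih =>
    intro l' h
    cases l' with
    | nil => simp at h
    | cons b u =>
      simp only [List.flatMap_cons, List.cons_append, List.nil_append, List.cons.injEq] at h
      obtain ⟨h1, h2, h3⟩ := h
      rw [ih u h3, Prod.ext_iff.mpr ⟨h1, h2⟩]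

theorem map_phi_inj : ∀ S S' : List (Int × Int), (∀ h ∈ S, h ∈ VN) → (∀ h ∈ S', h ∈ VN) →
    S.map phi = S'.map phi → S = S' := by
  intro S
  induction S with
  | nil => intro S' _ _ h; cases S' with
    | nil => rfl
    | cons b u => simp at h
  | cons a t ih =>
    intro S' hS hS' h
    cases S' with
    | nil => simp at h
    | cons b u =>
      simp only [List.map_cons, List.cons.injEq] at h
      rw [phi_inj_VN a (hS a (by simp)) b (hS' b (by simp)) h.1,
        ih u (fun x hx => hS x (by simp [hx])) (fun x hx => hS' x (by simp [hx])) h.2]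

theorem mem_sorted2 (hs : List (Int × Int)) (x : Int × Int)
    (hx : x ∈ PySem.List.sorted2 hs (fun h => h.1) (fun h => h.2)) : x ∈ hs :=
  (PySem.List.sorted2_perm hs _ _ false).mem_iff.mp hx

theorem key_iff (hs hs' : List (Int × Int)) (h1 : ∀ h ∈ hs, h ∈ VN) (h2 : ∀ h ∈ hs', h ∈ VN)
    (d d' : Nat) :
    keyA d hs = keyA d' hs' ↔ keyB d (hs.map phi) = keyB d' (hs'.map phi) := by
  rw [keyA_flat hs d, keyA_flat hs' d', key_corr hs h1 d, key_corr hs' h2 d']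
  simp only [List.cons.injEq]
  constructor
  · rintro ⟨hd, hf⟩
    exact ⟨hd, by rw [flat_inj _ _ hf]⟩
  · rintro ⟨hd, hm⟩
    refine ⟨hd, ?_⟩
    rw [map_phi_inj _ _ (fun x hx => h1 x (mem_sorted2 hs x hx))
      (fun x hx => h2 x (mem_sorted2 hs' x hx)) hm]

def EqLookup (dpA dpB : PySem.Dict (List Int) Int) : Prop :=
  ∀ (d : Nat) (hs : List (Int × Int)), (∀ h ∈ hs, h ∈ VN) →
    PySem.Dict.get? dpA (keyA d hs) = PySem.Dict.get? dpB (keyB d (hs.map phi))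

theorem eqLookup_insert (dpA dpB : PySem.Dict (List Int) Int) (h : EqLookup dpA dpB)
    (d0 : Nat) (hs0 : List (Int × Int)) (hsub : ∀ h ∈ hs0, h ∈ VN) (v : Int) :
    EqLookup (dpA.insert (keyA d0 hs0) v) (dpB.insert (keyB d0 (hs0.map phi)) v) := by
  intro d hs hsub'
  by_cases he : keyA d hs = keyA d0 hs0
  · rw [he, PySem.Dict.get?_insert_self,
      (key_iff hs hs0 hsub' hsub d d0).mp he, PySem.Dict.get?_insert_self]
  · rw [PySem.Dict.get?_insert_of_ne _ _ he,
      PySem.Dict.get?_insert_of_ne _ _ (fun hc => he ((key_iff hs hs0 hsub' hsub d d0).mpr hc))]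
    exact h d hs hsub'

theorem dv_nonneg (values : List Int) (hpre : Pre_solution values) (i : Int) :
    0 ≤ (PySem.List.pyGet? values i).getD 0 := by
  cases hg : PySem.List.pyGet? values i with
  | none => simp
  | some x => simpa using hpre x (PySem.List.mem_of_pyGet?_eq_some _ hg)

theorem enumerate_map (f : Int × Int → Int) (hs : List (Int × Int)) :
    ∀ s : Int, PySem.List.enumerate (hs.map f) s
      = (PySem.List.enumerate hs s).map (fun q => (q.1, f q.2)) := by
  induction hs with
  | nil => intro s; simp [PySem.List.enumerate_nil]
  | cons x t ih => intro s; simp [PySem.List.enumerate_cons, ih]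

theorem occ_corr (hs : List (Int × Int)) (hsub : ∀ h ∈ hs, h ∈ VN) (np : Int × Int)
    (hnp : np ∈ VN) :
    is_occupied hs np.1 np.2 = ((phi np != FINISHB) && decide (phi np ∈ hs.map phi)) := by
  unfold is_occupied
  rw [fin_iff np hnp]
  have hmem : (np ∈ hs) ↔ (phi np ∈ hs.map phi) := by
    constructor
    · exact fun h => List.mem_map_of_mem h
    · intro h
      obtain ⟨y, hy, hyeq⟩ := List.mem_map.mp h
      rwa [← phi_inj_VN y (hsub y hy) np hnp hyeq]
  cases hf : (phi np == FINISHB) <;> simp [hf, hmem, bne]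

theorem sim (values : List Int) (hpre : Pre_solution values) :
    ∀ (fuel : Nat) (hs : List (Int × Int)) (dice : Nat) (score : Int)
      (dpA dpB : PySem.Dict (List Int) Int),
      (∀ h ∈ hs, h ∈ VN) → EqLookup dpA dpB →
      (searchA values fuel hs dice score dpA).1
        = (searchB values fuel (hs.map phi) dice score dpB).1 ∧
      EqLookup (searchA values fuel hs dice score dpA).2
        (searchB values fuel (hs.map phi) dice score dpB).2 := by
  intro fuel
  induction fuel with
  | zero =>
    intro hs dice score dpA dpB hsub hE
    rw [searchA, searchB, ← hE dice hs hsub]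
    cases hg : PySem.Dict.get? dpA (keyA dice hs) with
    | some v => exact ⟨rfl, hE⟩
    | none =>
      simp only []
      by_cases hd : dice = values.length
      · simp only [if_pos hd]; exact ⟨by trivial, hE⟩
      · simp only [if_neg hd]; exact ⟨by trivial, hE⟩
  | succ fuel ih =>
    intro hs dice score dpA dpB hsub hE
    rw [searchA, searchB, ← hE dice hs hsub]
    cases hg : PySem.Dict.get? dpA (keyA dice hs) with
    | some v => exact ⟨rfl, hE⟩
    | none =>
      simp only []
      by_cases hd : dice = values.length
      · simp only [if_pos hd]; exact ⟨by trivial, hE⟩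
      simp only [if_neg hd]
      have hdv0 : 0 ≤ (PySem.List.pyGet? values (dice : Int)).getD 0 := dv_nonneg values hpre _
      rw [enumerate_map phi hs 0]
      have loop : ∀ pend : List (Int × (Int × Int)),
          (∀ q ∈ pend, q.2 ∈ VN ∧ 0 ≤ q.1) →
          ∀ (best : Int) (dA dB : PySem.Dict (List Int) Int), EqLookup dA dB →
          (pend.foldl
            (fun (acc : Int × PySem.Dict (List Int) Int) q =>
              if is_finished q.2.1 q.2.2 then acc
              else
                let np := normalize_pos (q.2.1 + (PySem.List.pyGet? values (dice : Int)).getD 0) q.2.2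
                if is_occupied hs np.1 np.2 then acc
                else
                  let point := (PySem.List.pyGet? ((PySem.List.pyGet? GRAPHS np.2).getD []) np.1).getD 0
                  let s := searchA values fuel (PySem.List.pySetD hs q.1 np) (dice + 1)
                             (score + point) acc.2
                  (max acc.1 s.1, s.2)) (best, dA)).1
            = ((pend.map (fun q => (q.1, phi q.2))).foldl
            (fun (acc : Int × PySem.Dict (List Int) Int) q =>
              if q.2 == FINISHB then acc
              else
                let dest := moveB q.2 ((PySem.List.pyGet? values (dice : Int)).getD 0)
                if dest != FINISHB && decide (dest ∈ hs.map phi) then acc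
                else
                  let s := searchB values fuel (PySem.List.pySetD (hs.map phi) q.1 dest) (dice + 1)
                             (score + PySem.Dict.getD SCOREd dest 0) acc.2
                  (max acc.1 s.1, s.2)) (best, dB)).1 ∧
          EqLookup
            (pend.foldl
            (fun (acc : Int × PySem.Dict (List Int) Int) q =>
              if is_finished q.2.1 q.2.2 then acc
              else
                let np := normalize_pos (q.2.1 + (PySem.List.pyGet? values (dice : Int)).getD 0) q.2.2
                if is_occupied hs np.1 np.2 then acc
                else
                  let point := (PySem.List.pyGet? ((PySem.List.pyGet? GRAPHS np.2).getD []) np.1).getD 0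
                  let s := searchA values fuel (PySem.List.pySetD hs q.1 np) (dice + 1)
                             (score + point) acc.2
                  (max acc.1 s.1, s.2)) (best, dA)).2
            ((pend.map (fun q => (q.1, phi q.2))).foldl
            (fun (acc : Int × PySem.Dict (List Int) Int) q =>
              if q.2 == FINISHB then acc
              else
                let dest := moveB q.2 ((PySem.List.pyGet? values (dice : Int)).getD 0)
                if dest != FINISHB && decide (dest ∈ hs.map phi) then acc
                else
                  let s := searchB values fuel (PySem.List.pySetD (hs.map phi) q.1 dest) (dice + 1)
                             (score + PySem.Dict.getD SCOREd dest 0) acc.2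
                  (max acc.1 s.1, s.2)) (best, dB)).2 := by
        intro pend
        induction pend with
        | nil => exact fun _ best dA dB hE' => ⟨rfl, hE'⟩
        | cons q pend ihp =>
          intro hq best dA dB hE'
          obtain ⟨hqVN, hq1⟩ := hq q List.mem_cons_self
          have hqtail : ∀ r ∈ pend, r.2 ∈ VN ∧ 0 ≤ r.1 := fun r hr => hq r (List.mem_cons_of_mem _ hr)
          simp only [List.map_cons, List.foldl_cons]
          by_cases hfin : is_finished q.2.1 q.2.2
          · have hfinB : (phi q.2 == FINISHB) = true := by rw [← fin_iff q.2 hqVN]; exact hfin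
            simp only [hfin, hfinB, if_pos]
            exact ihp hqtail best dA dB hE'
          · have hfinB : (phi q.2 == FINISHB) = false := by
              rw [← fin_iff q.2 hqVN]; exact Bool.of_not_eq_true hfin
            simp only [hfin, hfinB, if_false, Bool.false_eq_true]
            obtain ⟨hnpVN, hmove⟩ := move_corr q.2 hqVN _ hdv0
            rw [hmove, ← score_eq _ hnpVN, occ_corr hs hsub _ hnpVN]
            cases hocc : ((phi (normalize_pos (q.2.1 + (PySem.List.pyGet? values (dice : Int)).getD 0) q.2.2) != FINISHB) && decide ((phi (normalize_pos (q.2.1 + (PySem.List.pyGet? values (dice : Int)).getD 0) q.2.2)) ∈ hs.map phi)) with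
            | true =>
              simp only [if_true]
              exact ihp hqtail best dA dB hE'
            | false =>
              simp only [Bool.false_eq_true, if_false]
              rw [PySem.List.pySetD_of_nonneg _ _ hq1, PySem.List.pySetD_of_nonneg _ _ hq1,
                ← List.map_set]
              obtain ⟨hr1, hr2⟩ := ih (hs.set q.1.toNat (normalize_pos (q.2.1 + (PySem.List.pyGet? values (dice : Int)).getD 0) q.2.2)) (dice + 1)
                (score + (PySem.List.pyGet? ((PySem.List.pyGet? GRAPHS (normalize_pos (q.2.1 + (PySem.List.pyGet? values (dice : Int)).getD 0) q.2.2).2).getD []) (normalize_pos (q.2.1 + (PySem.List.pyGet? values (dice : Int)).getD 0) q.2.2).1).getD 0) dA dB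
                (fun x hx => by
                  rcases List.mem_or_eq_of_mem_set hx with h | h
                  · exact hsub x h
                  · exact h ▸ hnpVN) hE'
              rw [hr1]
              exact ihp hqtail _ _ _ hr2
      obtain ⟨hl1, hl2⟩ := loop (PySem.List.enumerate hs 0)
        (fun q hq => by
          obtain ⟨k, hk, hqe⟩ := (PySem.List.mem_enumerate_iff _ _ _).mp hq
          subst hqe
          exact ⟨hsub _ (List.getElem_mem hk), by simp⟩)
        score dpA dpB hE
      rw [hl1]
      exact ⟨rfl, eqLookup_insert _ _ hl2 dice hs hsub _⟩
-- ===== VERDICT (by name: the statement is the Claim_ definition above) =====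
theorem solution_spec : Claim_equal_solution := by
  intro values _ hpre
  unfold Spec_solution solution solution_alt
  have h := sim values hpre values.length [(0,0),(0,0),(0,0),(0,0)] 0 0
    PySem.Dict.empty PySem.Dict.empty (by decide) (by intro d hs _; rfl)
  simpa using h.1
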